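-- pv_equiv track=rewrite | github.com/jk-jung/problem-solving | codewars/6kyu/6_Missing Alphabet.py | insert_missing_letters
-- ===== SOURCE A (Python) =====
-- def insert_missing_letters(s):
--     r, used = '', set()
--     for x in s:
--         r += x
--         if x in used: continue
--         used.add(x)
--         for i in range(26):
--             a = chr(ord('a') + i)
--             b = chr(ord('A') + i)
--             if a in s: continue
--             if a > x: r += b
--     return r
-- ===== SOURCE B (Python) =====
-- def insert_missing_letters(s):
--     missing = [(chr(ord('a') + i), chr(ord('A') + i))
--                for i in range(26) if chr(ord('a') + i) not in s]
--     app = {c: ''.join(u for (low, u) in missing if low > c) for c in set(s)}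
--     out, used = [], set()
--     for x in s:
--         out.append(x)
--         if x not in used:
--             used.add(x)
--             out.append(app[x])
--     return ''.join(out)
-- ===== Notes on version B (the rewrite author's own statement) =====
-- stated objective: alternative
-- what changed: B precomputes the missing-letter list and a per-distinct-character insertion table once and does a single pass with table lookups, instead of A's 26-iteration rescan of s (via 'a in s') at every first occurrence.
import Mathlib
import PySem

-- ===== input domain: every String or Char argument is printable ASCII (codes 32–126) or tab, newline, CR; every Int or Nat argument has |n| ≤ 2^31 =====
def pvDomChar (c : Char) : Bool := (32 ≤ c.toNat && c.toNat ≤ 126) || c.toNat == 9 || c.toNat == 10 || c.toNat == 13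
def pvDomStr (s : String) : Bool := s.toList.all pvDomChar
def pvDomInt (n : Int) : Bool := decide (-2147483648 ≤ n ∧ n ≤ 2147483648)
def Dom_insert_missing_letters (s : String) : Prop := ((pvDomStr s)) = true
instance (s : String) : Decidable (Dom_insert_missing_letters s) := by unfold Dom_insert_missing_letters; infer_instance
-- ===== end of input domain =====

-- B replaces A's 26-letter rescan of s at every first occurrence by a precomputed
-- missing-letter list and a per-distinct-character insertion table (objective: alternative).

-- ===== PORT A =====
-- A: for each x append x; on first occurrence of x, scan i = 0..25 and append
-- chr(65+i) whenever chr(97+i) is not in s and chr(97+i) > x.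
def insert_missing_letters (s : String) : String :=
  let cs := s.toList
  let step : List Char × PySem.Set Char → Char → List Char × PySem.Set Char :=
    fun acc x =>
      let r := acc.1 ++ [x]
      if PySem.Set.contains acc.2 x then (r, acc.2)
      else
        let used := PySem.Set.add acc.2 x
        let r := (List.range 26).foldl (fun r i =>
          let a := Char.ofNat (97 + i)
          let b := Char.ofNat (65 + i)
          if cs.contains a then r
          else if x < a then r ++ [b] else r) r
        (r, used)
  String.ofList (cs.foldl step ([], PySem.Set.empty)).1

-- ===== PORT B =====
-- B: missing = [(low, up)] for the 26 letters with low not in s; app maps each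
-- distinct character c of s to the uppercase letters with low > c; one pass with lookups.
def insert_missing_letters_alt (s : String) : String :=
  let cs := s.toList
  let missing : List (Char × Char) := (List.range 26).filterMap (fun i =>
    let a := Char.ofNat (97 + i)
    if cs.contains a then none else some (a, Char.ofNat (65 + i)))
  let app : PySem.Dict Char (List Char) :=
    (PySem.Set.ofList cs).foldl
      (fun d c => d.insert c (((missing.filter (fun p => c < p.1)).map Prod.snd))) PySem.Dict.empty
  let step : List Char × PySem.Set Char → Char → List Char × PySem.Set Char :=
    fun acc x =>
      let out := acc.1 ++ [x]
      if PySem.Set.contains acc.2 x then (out, acc.2)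
      else (out ++ app.getD x [], PySem.Set.add acc.2 x)
  String.ofList (cs.foldl step ([], PySem.Set.empty)).1

-- ===== PRECONDITION & SPEC =====
def Spec_insert_missing_letters (s : String) (out : String) : Prop := out = insert_missing_letters_alt s
instance (s : String) (out : String) : Decidable (Spec_insert_missing_letters s out) := by unfold Spec_insert_missing_letters; infer_instance

-- ===== CLAIM (what is proved, stated in full; the proofs are below) =====
def Claim_equal_insert_missing_letters : Prop := ∀ (s : String), Dom_insert_missing_letters s → Spec_insert_missing_letters s (insert_missing_letters s)

-- ===== LEMMAS AND PROOFS =====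

-- A's inner 26-letter loop, run from accumulator r, appends exactly B's filtered list
-- (stated in simp-normal form: list membership and decide).
theorem pv_inner_eq (cs : List Char) (x : Char) :
    ∀ (l : List Nat) (r : List Char),
      l.foldl (fun r i =>
          if Char.ofNat (97 + i) ∈ cs then r
          else if x < Char.ofNat (97 + i) then r ++ [Char.ofNat (65 + i)] else r) r
      = r ++ ((l.filterMap (fun i =>
            if Char.ofNat (97 + i) ∈ cs then none
            else some (Char.ofNat (97 + i), Char.ofNat (65 + i)))).filter
              (fun p => x < p.1)).map Prod.snd := by
  intro l
  induction l with
  | nil => intro r; simp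
  | cons i t ih =>
      intro r
      simp only [List.foldl_cons, List.filterMap_cons]
      by_cases h : Char.ofNat (97 + i) ∈ cs
      · simp [h, ih]
      · by_cases h2 : x < Char.ofNat (97 + i)
        · simp [h, h2, ih]
        · simp [h, h2, ih]

-- looking up x in the dict built by inserting f c for every c of ks
theorem pv_getD_foldl_insert (f : Char → List Char) (x : Char) :
    ∀ (ks : List Char) (d0 : PySem.Dict Char (List Char)),
      (ks.foldl (fun d c => d.insert c (f c)) d0).getD x []
        = if x ∈ ks then f x else d0.getD x [] := by
  intro ks
  induction ks with
  | nil => intro d0; simp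
  | cons k t ih =>
      intro d0
      simp only [List.foldl_cons, ih, List.mem_cons]
      by_cases hm : x ∈ t
      · simp [hm]
      · by_cases he : x = k
        · simp [he]
        · simp [hm, he, PySem.Dict.getD_insert]

-- ===== VERDICT (by name: the statement is the Claim_ definition above) =====
theorem insert_missing_letters_spec : Claim_equal_insert_missing_letters := by
  intro s _
  unfold Spec_insert_missing_letters insert_missing_letters insert_missing_letters_alt
  dsimp only
  apply congrArg
  apply congrArg (fun p : List Char × PySem.Set Char => p.1)
  apply PySem.List.foldl_congr_mem
  intro acc x hx
  by_cases hc : x ∈ acc.2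
  · simp [hc]
  · simp only [PySem.Set.contains_eq_listContains, List.contains_eq_mem, hc, decide_false,
      Bool.false_eq_true, if_false]
    simp only [decide_eq_true_eq]
    rw [pv_inner_eq, pv_getD_foldl_insert]
    simp [PySem.Set.mem_ofList, hx]
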